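-- pv_equiv track=rewrite | github.com/violet2016/pyimg_base64 | get_cord.py | f_shuffle_r
-- ===== SOURCE A (Python) =====
-- def f_shuffle_r(ar_number,snum,x_idx,y):
--     gn = kn = int(y/2)
--     if y%2 != 0:
--         gn += 1
--     ar_g = [None]*gn
--     ar_k = [None]*kn
--     g_cnt=k_cnt=0
--
--     ar_tmp = [None]*y
--     cnt = 0
--     if snum%2 == 0:
--         for i in range(y):
--             if i%2 == 0:
--                 ar_g[g_cnt] = ar_number[i][x_idx]
--                 g_cnt+=1
--             else:
--                 ar_k[k_cnt] = ar_number[i][x_idx]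
--                 k_cnt+=1
--
--         for i in range(gn):
--             if i < len(ar_k) and ar_k[i] != None:
--                 ar_tmp[cnt] = ar_k[i]
--                 cnt+=1
--             if ar_g[i] != None:
--                 ar_tmp[cnt] = ar_g[i]
--                 cnt+=1
--     else:
--         for i in range(y):
--             if i < gn:
--                 ar_g[g_cnt] = ar_number[i][x_idx]
--                 g_cnt+=1
--             else:
--                 ar_k[k_cnt] = ar_number[i][x_idx]
--                 k_cnt+=1
--
--         for i in range(gn):
--             if ar_g[i] != None:
--                 ar_tmp[cnt] = ar_g[i]
--                 cnt+=1
--             if i < len(ar_k) and ar_k[i] != None: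
--                 ar_tmp[cnt] = ar_k[i]
--                 cnt+=1
--
--     for i in range(y):
--         ar_number[i][x_idx] = ar_tmp[i]
--     return ar_number
-- ===== SOURCE B (Python) =====
-- def _riffle(a, b):
--     out = []
--     for x, z in zip(a, b):
--         out += [x, z]
--     out += a[len(b):] + b[len(a):]
--     return out
--
-- def f_shuffle_r(ar_number, snum, x_idx, y):
--     col = [ar_number[i][x_idx] for i in range(y)]
--     if snum % 2 == 0:
--         out = _riffle(col[1::2], col[0::2])
--     else:
--         gn = (len(col) + 1) // 2
--         out = _riffle(col[:gn], col[gn:])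
--     for i in range(y):
--         ar_number[i][x_idx] = out[i]
--     return ar_number
-- ===== Notes on version B (the rewrite author's own statement) =====
-- stated objective: simpler
-- what changed: B reads the column once into a list, splits it with slices (col[0::2]/col[1::2] for even snum, a take/drop split at (y+1)//2 for odd snum), riffles the two halves with zip plus leftover tails, and writes the result back, replacing A's four counter-driven index loops over None-initialised scratch arrays and its drop-and-compact pass.
import Mathlib
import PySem

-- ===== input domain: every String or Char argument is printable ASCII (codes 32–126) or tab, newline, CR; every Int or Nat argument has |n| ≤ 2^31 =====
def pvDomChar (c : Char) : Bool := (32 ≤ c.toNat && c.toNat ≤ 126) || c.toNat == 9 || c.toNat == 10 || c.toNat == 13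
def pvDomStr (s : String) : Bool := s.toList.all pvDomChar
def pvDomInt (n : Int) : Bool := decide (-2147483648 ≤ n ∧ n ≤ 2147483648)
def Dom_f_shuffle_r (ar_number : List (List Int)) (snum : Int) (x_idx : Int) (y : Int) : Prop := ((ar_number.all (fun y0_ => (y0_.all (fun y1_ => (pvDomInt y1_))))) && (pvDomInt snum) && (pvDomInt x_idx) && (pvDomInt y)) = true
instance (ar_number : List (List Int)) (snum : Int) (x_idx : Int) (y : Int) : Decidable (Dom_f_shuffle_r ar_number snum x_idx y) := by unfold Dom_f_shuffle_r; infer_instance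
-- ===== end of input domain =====

-- B replaces A's four counter-driven index loops by reading the column once, splitting it with
-- slices and riffling the two halves with zip (objective: simpler).  Both A and B mutate
-- ar_number's rows in place in Python (the same mutation); the theorems are about the return value.

-- ===== PORT A =====
-- guarded "ar_tmp[cnt] = v; cnt += 1" step of the second loops
def pvWriteIf (s : List (Option Int) × Nat) (cond : Prop) [Decidable cond] (v : Option Int) :
    List (Option Int) × Nat :=
  if cond then (s.1.set s.2 v, s.2 + 1) else s

-- int(y/2) truncates toward zero; exact for |y| ≤ 2^31, so it is Int.tdiv.
def f_shuffle_r (ar_number : List (List Int)) (snum : Int) (x_idx : Int) (y : Int) : List (List Int) :=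
  let gn0 : Int := Int.tdiv y 2
  let gn : Int := if PySem.Int.mod y 2 ≠ 0 then gn0 + 1 else gn0
  let kn : Int := gn0
  -- ar_number[i][x_idx]; total via defaults, exact under Pre_f_shuffle_r
  let colAt : Int → Int := fun i => PySem.List.pyGetD (PySem.List.pyGetD ar_number i []) x_idx 0
  let ar_tmp : List (Option Int) :=
    if PySem.Int.mod snum 2 = 0 then
      let st := (PySem.List.pyRange 0 y 1).foldl
        (fun (s : List (Option Int) × List (Option Int) × Nat × Nat) i =>
          match s with
          | (ag, ak, gc, kc) =>
            if PySem.Int.mod i 2 = 0 then (ag.set gc (some (colAt i)), ak, gc + 1, kc)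
            else (ag, ak.set kc (some (colAt i)), gc, kc + 1))
        (List.replicate gn.toNat none, List.replicate kn.toNat none, 0, 0)
      match st with
      | (ag, ak, _, _) =>
        ((PySem.List.pyRange 0 gn 1).foldl
          (fun (s : List (Option Int) × Nat) i =>
            pvWriteIf
              (pvWriteIf s (i < (ak.length : Int) ∧ PySem.List.pyGetD ak i none ≠ none)
                (PySem.List.pyGetD ak i none))
              (PySem.List.pyGetD ag i none ≠ none) (PySem.List.pyGetD ag i none))
          (List.replicate y.toNat none, 0)).1
    else
      let st := (PySem.List.pyRange 0 y 1).foldl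
        (fun (s : List (Option Int) × List (Option Int) × Nat × Nat) i =>
          match s with
          | (ag, ak, gc, kc) =>
            if i < gn then (ag.set gc (some (colAt i)), ak, gc + 1, kc)
            else (ag, ak.set kc (some (colAt i)), gc, kc + 1))
        (List.replicate gn.toNat none, List.replicate kn.toNat none, 0, 0)
      match st with
      | (ag, ak, _, _) =>
        ((PySem.List.pyRange 0 gn 1).foldl
          (fun (s : List (Option Int) × Nat) i =>
            pvWriteIf
              (pvWriteIf s (PySem.List.pyGetD ag i none ≠ none) (PySem.List.pyGetD ag i none))
              (i < (ak.length : Int) ∧ PySem.List.pyGetD ak i none ≠ none)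
              (PySem.List.pyGetD ak i none))
          (List.replicate y.toNat none, 0)).1
  (PySem.List.pyRange 0 y 1).foldl
    (fun ar i =>
      PySem.List.pySetD ar i
        (PySem.List.pySetD (PySem.List.pyGetD ar i []) x_idx
          ((PySem.List.pyGetD ar_tmp i none).getD 0)))
    ar_number

-- ===== PORT B =====
-- _riffle(a, b): zip pairs flattened, then the unpaired tails
def pvRiffle (a b : List Int) : List Int :=
  ((a.zip b).foldl (fun out p => out ++ [p.1, p.2]) [])
    ++ PySem.List.slice a (some (b.length : Int)) none
    ++ PySem.List.slice b (some (a.length : Int)) none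

def f_shuffle_r_alt (ar_number : List (List Int)) (snum : Int) (x_idx : Int) (y : Int) : List (List Int) :=
  let col : List Int := (PySem.List.pyRange 0 y 1).map
    (fun i => PySem.List.pyGetD (PySem.List.pyGetD ar_number i []) x_idx 0)
  let out : List Int :=
    if PySem.Int.mod snum 2 = 0 then
      pvRiffle ((PySem.List.slice? col (some 1) none 2).getD [])
               ((PySem.List.slice? col (some 0) none 2).getD [])
    else
      let gn : Int := PySem.Int.floordiv ((col.length : Int) + 1) 2
      pvRiffle (PySem.List.slice col none (some gn)) (PySem.List.slice col (some gn) none)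
  (PySem.List.pyRange 0 y 1).foldl
    (fun ar i =>
      PySem.List.pySetD ar i
        (PySem.List.pySetD (PySem.List.pyGetD ar i []) x_idx (PySem.List.pyGetD out i 0)))
    ar_number

-- ===== PRECONDITION & SPEC =====
-- Pre_ excludes exactly the inputs on which A raises IndexError: some row index 0 ≤ i < y
-- beyond ar_number, or x_idx out of range (Python negative-index rule) for one of those rows.
def Pre_f_shuffle_r (ar_number : List (List Int)) (snum : Int) (x_idx : Int) (y : Int) : Prop :=
  y ≤ (ar_number.length : Int) ∧
  ∀ r ∈ ar_number.take y.toNat, PySem.Raise.InRange r.length x_idx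

instance (ar_number : List (List Int)) (snum : Int) (x_idx : Int) (y : Int) : Decidable (Pre_f_shuffle_r ar_number snum x_idx y) := by unfold Pre_f_shuffle_r; infer_instance

def pvWitness_f_shuffle_r : List (List Int) × Int × Int × Int := ([[1], [2], [3], [4], [5]], 2, 0, 5)

def Spec_f_shuffle_r (ar_number : List (List Int)) (snum : Int) (x_idx : Int) (y : Int) (out : List (List Int)) : Prop := out = f_shuffle_r_alt ar_number snum x_idx y
instance (ar_number : List (List Int)) (snum : Int) (x_idx : Int) (y : Int) (out : List (List Int)) : Decidable (Spec_f_shuffle_r ar_number snum x_idx y out) := by unfold Spec_f_shuffle_r; infer_instance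

-- ===== CLAIM (what is proved, stated in full; the proofs are below) =====
def Claim_equal_f_shuffle_r : Prop := ∀ (ar_number : List (List Int)) (snum : Int) (x_idx : Int) (y : Int), Dom_f_shuffle_r ar_number snum x_idx y → Pre_f_shuffle_r ar_number snum x_idx y → Spec_f_shuffle_r ar_number snum x_idx y (f_shuffle_r ar_number snum x_idx y)

-- ===== LEMMAS AND PROOFS =====

-- every-other-element of a list, starting at index 0 (pvEvens) resp. 1 (pvOdds)
mutual
def pvEvens {α : Type} : List α → List α
  | [] => []
  | x :: l => x :: pvOdds l
def pvOdds {α : Type} : List α → List α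
  | [] => []
  | _ :: l => pvEvens l
end

-- structural riffle: alternate the two lists, then dump the longer tail
def pvIl {α : Type} : List α → List α → List α
  | [], b => b
  | a, [] => a
  | x :: a, z :: b => x :: z :: pvIl a b

theorem pvEO_len {α : Type} (l : List α) :
    (pvEvens l).length = (l.length + 1) / 2 ∧ (pvOdds l).length = l.length / 2 := by
  induction l with
  | nil => simp [pvEvens, pvOdds]
  | cons x l ih =>
    simp only [pvEvens, pvOdds, List.length_cons]
    refine ⟨?_, ?_⟩
    · simp only [pvEvens, List.length_cons, ih.2]; try omega
    · simp only [pvOdds, ih.1, List.length_cons]; try omega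

theorem pvEO_append {α : Type} (l : List α) (x : α) :
    (pvEvens (l ++ [x]) = if l.length % 2 = 0 then pvEvens l ++ [x] else pvEvens l) ∧
    (pvOdds (l ++ [x]) = if l.length % 2 = 0 then pvOdds l else pvOdds l ++ [x]) := by
  induction l with
  | nil => simp [pvEvens, pvOdds]
  | cons a l ih =>
    simp only [List.cons_append, pvEvens, pvOdds, List.length_cons]
    by_cases h : l.length % 2 = 0
    · have h1 : (l.length + 1) % 2 ≠ 0 := by omega
      rw [ih.1, ih.2]; simp [h, h1]
    · have h1 : (l.length + 1) % 2 = 0 := by omega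
      rw [ih.1, ih.2]; simp [h, h1]

theorem pvIl_len {α : Type} (a b : List α) : (pvIl a b).length = a.length + b.length := by
  fun_induction pvIl <;> simp [*] <;> omega

theorem pvIl_nil_right {α : Type} (a : List α) : pvIl a [] = a := by cases a <;> rfl

theorem pvIl_take {α : Type} [Inhabited α] :
    ∀ (m : Nat) (K E : List α), m < E.length → K.length ≤ E.length →
    pvIl (K.take (m + 1)) (E.take (m + 1)) =
      pvIl (K.take m) (E.take m) ++ (if m < K.length then [K[m]!, E[m]!] else [E[m]!]) := by
  intro m
  induction m with
  | zero =>
    intro K E hE _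
    match E, K with
    | e :: E', [] => simp [pvIl]
    | e :: E', k :: K' => simp [pvIl]
  | succ m ih =>
    intro K E hE hKE
    match E, K with
    | e :: E', [] =>
      have hm : m + 1 < (e :: E').length := hE
      simp only [List.take_nil, pvIl, List.length_nil]
      rw [if_neg (by omega)]
      rw [List.take_add_one]
      congr 1
      rw [List.getElem?_eq_getElem hm]
      simp [List.getElem!_eq_getElem?_getD, List.getElem?_eq_getElem hm]
    | e :: E', k :: K' =>
      simp only [List.take_succ_cons, pvIl]
      rw [ih K' E' (by simpa using hE) (by simpa using hKE)]
      simp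

-- range/filterMap characterization of evens/odds
theorem pvEO_filterMap {α : Type} (xs : List α) :
    ((List.range ((xs.length + 1) / 2)).filterMap (fun k => xs[2 * k]?) = pvEvens xs) ∧
    ((List.range (xs.length / 2)).filterMap (fun k => xs[2 * k + 1]?) = pvOdds xs) := by
  induction xs with
  | nil => simp [pvEvens, pvOdds]
  | cons x l ih =>
    constructor
    · have hc : ((x :: l).length + 1) / 2 = l.length / 2 + 1 := by simp only [List.length_cons]; omega
      rw [hc, List.range_succ_eq_map]
      simp only [List.filterMap_cons, List.filterMap_map]
      have : (fun k => (x :: l)[2 * (k + 1)]?) ∘ id = fun k => l[2 * k + 1]? := by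
        funext k
        have : 2 * (k + 1) = (2 * k + 1) + 1 := by omega
        simp [this]
      simp only [Function.comp_def]
      have h0 : (x :: l)[2 * 0]? = some x := by simp
      rw [h0]
      simp only [pvEvens]
      congr 1
      calc (List.range (l.length / 2)).filterMap (fun k => (x :: l)[2 * (k + 1)]?)
          = (List.range (l.length / 2)).filterMap (fun k => l[2 * k + 1]?) := by
            apply List.filterMap_congr; intro k _
            have h2 : 2 * (k + 1) = (2 * k + 1) + 1 := by omega
            rw [h2]; simp
        _ = pvOdds l := ih.2
    · show (List.range ((x :: l).length / 2)).filterMap (fun k => (x :: l)[2 * k + 1]?) = pvEvens l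
      have hc : (x :: l).length / 2 = (l.length + 1) / 2 := by
        simp only [List.length_cons]
      rw [hc]
      have hf : (fun k => (x :: l)[2 * k + 1]?) = fun (k : Nat) => l[2 * k]? := by
        funext k; simp
      rw [hf]
      exact ih.1

theorem slice1 (xs : List Int) :
    PySem.List.slice? xs (some 1) none 2 =
      some ((List.range (xs.length / 2)).filterMap (fun k => xs[2 * k + 1]?)) := by
  simp only [PySem.List.slice?, PySem.List.sliceIndices]
  norm_num
  rcases Nat.eq_zero_or_pos xs.length with h0 | hpos
  · simp [h0]
  · have hmin : min (1 : Int) (xs.length : Int) = 1 := by omega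
    rw [hmin]
    have hc : (if 1 < xs.length then (((xs.length : Int) - 1 + 2 - 1) / 2).toNat else 0) = xs.length / 2 := by
      split <;> omega
    rw [hc]
    apply List.filterMap_congr
    intro k _
    congr 1
    omega

theorem slice0 (xs : List Int) :
    PySem.List.slice? xs (some 0) none 2 =
      some ((List.range ((xs.length + 1) / 2)).filterMap (fun k => xs[2 * k]?)) := by
  simp only [PySem.List.slice?, PySem.List.sliceIndices]
  norm_num
  have hc : (if 0 < xs.length then (((xs.length : Int) + 2 - 1) / 2).toNat else 0) = (xs.length + 1) / 2 := by
    split <;> omega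
  rw [hc]
  apply List.filterMap_congr
  intro k _
  congr 1
  try omega




theorem pvFlatZip (a : List Int) : ∀ (b : List Int),
    ((a.zip b).flatMap (fun p => [p.1, p.2]) ++ a.drop b.length) ++ b.drop a.length = pvIl a b := by
  induction a with
  | nil => intro b; simp [pvIl]
  | cons x a ih =>
    intro b
    cases b with
    | nil => simp [pvIl_nil_right]
    | cons z b => simp only [List.zip_cons_cons, List.flatMap_cons, List.length_cons,
        List.drop_succ_cons, pvIl, ← ih b]; simp

theorem pvRiffle_eq_pvIl (a b : List Int) : pvRiffle a b = pvIl a b := by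
  unfold pvRiffle
  rw [PySem.List.foldl_append_eq_flatMap, PySem.List.slice_from_natCast,
      PySem.List.slice_from_natCast, List.nil_append, pvFlatZip]

theorem pvWrite (e : List Int) (x : Int) (G : Nat) (h : e.length < G) :
    (e.map some ++ List.replicate (G - e.length) none).set e.length (some x)
      = (e ++ [x]).map some ++ List.replicate (G - (e.length + 1)) none := by
  have hrep : List.replicate (G - e.length) (none : Option Int)
      = none :: List.replicate (G - (e.length + 1)) none := by
    rw [← List.replicate_succ]; congr 1; omega
  rw [List.set_append, if_neg (by simp), hrep]
  simp

def pvCm (v : Int → Int) (m : Nat) : List Int := (List.range m).map (fun k : Nat => v (k : Int))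

theorem pvCm_len (v : Int → Int) (m : Nat) : (pvCm v m).length = m := by simp [pvCm]

theorem pvCm_succ (v : Int → Int) (m : Nat) : pvCm v (m + 1) = pvCm v m ++ [v (m : Int)] := by
  simp [pvCm, List.range_succ]

theorem loop1_even (v : Int → Int) (G K : Nat) :
    ∀ (m : Nat), (m + 1) / 2 ≤ G → m / 2 ≤ K →
    (PySem.List.pyRange 0 (m : Int) 1).foldl
      (fun (s : List (Option Int) × List (Option Int) × Nat × Nat) i =>
        match s with
        | (ag, ak, gc, kc) =>
          if PySem.Int.mod i 2 = 0 then (ag.set gc (some (v i)), ak, gc + 1, kc)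
          else (ag, ak.set kc (some (v i)), gc, kc + 1))
      (List.replicate G none, List.replicate K none, 0, 0)
    = ((pvEvens (pvCm v m)).map some ++ List.replicate (G - (m + 1) / 2) none,
       (pvOdds (pvCm v m)).map some ++ List.replicate (K - m / 2) none,
       (m + 1) / 2, m / 2) := by
  intro m
  induction m with
  | zero =>
    intro _ _
    rw [show ((0 : Nat) : Int) = 0 by rfl, PySem.List.pyRange_one_eq_nil (by omega)]
    simp [pvCm, pvEvens, pvOdds]
  | succ m ih =>
    intro hG hK
    have hc : ((m + 1 : Nat) : Int) = (m : Int) + 1 := by push_cast; ring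
    rw [hc, PySem.List.pyRange_one_succ_right (by positivity), List.foldl_append,
        ih (by omega) (by omega), List.foldl_cons, List.foldl_nil]
    have hEl : (pvEvens (pvCm v m)).length = (m + 1) / 2 := by
      rw [(pvEO_len _).1, pvCm_len]
    have hOl : (pvOdds (pvCm v m)).length = m / 2 := by
      rw [(pvEO_len _).2, pvCm_len]
    have hmod : PySem.Int.mod (m : Int) 2 = ((m % 2 : Nat) : Int) := PySem.Int.mod_natCast m 2
    have hEa := (pvEO_append (pvCm v m) (v (m : Int))).1
    have hOa := (pvEO_append (pvCm v m) (v (m : Int))).2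
    rw [pvCm_len] at hEa hOa
    by_cases hp : m % 2 = 0
    · dsimp only
      have ht : PySem.Int.mod (m : Int) 2 = 0 := by rw [hmod, hp]; rfl
      rw [if_pos ht]
      rw [← hEl, pvWrite _ _ _ (by omega), pvCm_succ, hEa, hOa, if_pos hp, if_pos hp, hEl]
      simp only [Prod.mk.injEq]
      refine ⟨?_, ?_, by omega, by omega⟩
      · congr 2; omega
      · congr 2; omega
    · dsimp only
      have ht : ¬ (PySem.Int.mod (m : Int) 2 = 0) := by rw [hmod]; omega
      rw [if_neg ht]
      rw [← hOl, pvWrite _ _ _ (by omega), pvCm_succ, hEa, hOa, if_neg hp, if_neg hp, hOl]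
      simp only [Prod.mk.injEq]
      refine ⟨?_, ?_, by omega, by omega⟩
      · congr 2; omega
      · congr 2; omega

theorem loop1_odd (v : Int → Int) (G K : Nat) :
    ∀ (m : Nat), m ≤ G + K →
    (PySem.List.pyRange 0 (m : Int) 1).foldl
      (fun (s : List (Option Int) × List (Option Int) × Nat × Nat) i =>
        match s with
        | (ag, ak, gc, kc) =>
          if i < ((G : Nat) : Int) then (ag.set gc (some (v i)), ak, gc + 1, kc)
          else (ag, ak.set kc (some (v i)), gc, kc + 1))
      (List.replicate G none, List.replicate K none, 0, 0)
    = (((pvCm v m).take G).map some ++ List.replicate (G - min m G) none,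
       ((pvCm v m).drop G).map some ++ List.replicate (K - (m - G)) none,
       min m G, m - G) := by
  intro m
  induction m with
  | zero =>
    intro _
    rw [show ((0 : Nat) : Int) = 0 by rfl, PySem.List.pyRange_one_eq_nil (by omega)]
    simp [pvCm]
  | succ m ih =>
    intro hm
    have hc : ((m + 1 : Nat) : Int) = (m : Int) + 1 := by push_cast; ring
    rw [hc, PySem.List.pyRange_one_succ_right (by positivity), List.foldl_append,
        ih (by omega), List.foldl_cons, List.foldl_nil]
    dsimp only
    have hTl : ((pvCm v m).take G).length = min m G := by
      simp [pvCm_len, Nat.min_comm]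
    have hDl : ((pvCm v m).drop G).length = m - G := by simp [pvCm_len]
    by_cases hp : m < G
    · have ht : ((m : Int) < ((G : Nat) : Int)) := by exact_mod_cast hp
      rw [if_pos ht]
      have e1 : (pvCm v m).take G = pvCm v m := List.take_of_length_le (by rw [pvCm_len]; omega)
      have e2 : (pvCm v (m + 1)).take G = pvCm v (m + 1) :=
        List.take_of_length_le (by rw [pvCm_len]; omega)
      have d1 : (pvCm v m).drop G = [] := List.drop_eq_nil_of_le (by rw [pvCm_len]; omega)
      have d2 : (pvCm v (m + 1)).drop G = [] := List.drop_eq_nil_of_le (by rw [pvCm_len]; omega)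
      rw [e1, e2, d1, d2]
      have hlen : min m G = (pvCm v m).length := by rw [pvCm_len]; omega
      rw [hlen, pvWrite _ _ _ (by rw [pvCm_len]; omega), pvCm_succ]
      simp only [Prod.mk.injEq]
      refine ⟨?_, ?_, by rw [pvCm_len]; omega, by omega⟩
      · congr 2; rw [pvCm_len]; omega
      · congr 2; omega
    · have ht : ¬ ((m : Int) < ((G : Nat) : Int)) := by
        push_neg; exact_mod_cast Nat.le_of_not_lt hp
      rw [if_neg ht]
      have t2 : (pvCm v (m + 1)).take G = (pvCm v m).take G := by
        rw [pvCm_succ, List.take_append_of_le_length (by rw [pvCm_len]; omega)]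
      have d2 : (pvCm v (m + 1)).drop G = (pvCm v m).drop G ++ [v (m : Int)] := by
        rw [pvCm_succ, List.drop_append_of_le_length (by rw [pvCm_len]; omega)]
      have hlen : m - G = ((pvCm v m).drop G).length := hDl.symm
      rw [hlen, pvWrite _ _ _ (by rw [hDl]; omega), t2, d2]
      simp only [Prod.mk.injEq]
      refine ⟨?_, ?_, by omega, by omega⟩
      · congr 2; omega
      · congr 2; rw [hDl]; omega

theorem pvIl_take' {α : Type} [Inhabited α] :
    ∀ (m : Nat) (A B : List α), m < A.length → B.length ≤ A.length →
    pvIl (A.take (m + 1)) (B.take (m + 1)) =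
      pvIl (A.take m) (B.take m) ++ (if m < B.length then [A[m]!, B[m]!] else [A[m]!]) := by
  intro m
  induction m with
  | zero =>
    intro A B hA _
    match A, B with
    | a :: A', [] => simp [pvIl, pvIl_nil_right]
    | a :: A', b :: B' => simp [pvIl]
  | succ m ih =>
    intro A B hA hBA
    match A, B with
    | a :: A', [] =>
      have hm : m + 1 < (a :: A').length := hA
      simp only [List.take_nil, pvIl_nil_right, List.length_nil]
      rw [if_neg (by omega), List.take_add_one]
      congr 1
      rw [List.getElem?_eq_getElem hm]
      simp [List.getElem!_eq_getElem?_getD, List.getElem?_eq_getElem hm]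
    | a :: A', b :: B' =>
      simp only [List.take_succ_cons, pvIl]
      rw [ih A' B' (by simpa using hA) (by simpa using hBA)]
      simp

theorem pvGetSome (L : List Int) (m : Nat) (h : m < L.length) :
    PySem.List.pyGetD (L.map some) ((m : Nat) : Int) none = some L[m]! := by
  rw [PySem.List.pyGetD_natCast]
  rw [List.getD_eq_getElem?_getD, List.getElem?_map, List.getElem?_eq_getElem h]
  simp [List.getElem!_eq_getElem?_getD, List.getElem?_eq_getElem h]

theorem slice0' (xs : List Int) :
    (PySem.List.slice? xs (some 0) none 2).getD [] = pvEvens xs := by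
  rw [slice0, Option.getD_some, (pvEO_filterMap xs).1]

theorem slice1' (xs : List Int) :
    (PySem.List.slice? xs (some 1) none 2).getD [] = pvOdds xs := by
  rw [slice1, Option.getD_some, (pvEO_filterMap xs).2]

theorem loop2_even (K E : List Int) (N : Nat) (hKE : K.length ≤ E.length)
    (hN : N = E.length + K.length) :
    ∀ (m : Nat), m ≤ E.length →
    (PySem.List.pyRange 0 (m : Int) 1).foldl
      (fun (s : List (Option Int) × Nat) i =>
        pvWriteIf
          (pvWriteIf s (i < ((K.map some).length : Int) ∧
              PySem.List.pyGetD (K.map some) i none ≠ none)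
            (PySem.List.pyGetD (K.map some) i none))
          (PySem.List.pyGetD (E.map some) i none ≠ none) (PySem.List.pyGetD (E.map some) i none))
      (List.replicate N none, 0)
    = ((pvIl (K.take m) (E.take m)).map some ++
        List.replicate (N - (min m K.length + m)) none, min m K.length + m) := by
  intro m
  induction m with
  | zero =>
    intro _
    rw [show ((0 : Nat) : Int) = 0 by rfl, PySem.List.pyRange_one_eq_nil (by omega)]
    simp [pvIl]
  | succ m ih =>
    intro hm
    have hc : ((m + 1 : Nat) : Int) = (m : Int) + 1 := by push_cast; ring
    rw [hc, PySem.List.pyRange_one_succ_right (by positivity), List.foldl_append,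
        ih (by omega), List.foldl_cons, List.foldl_nil]
    have hmE : m < E.length := by omega
    have hgE := pvGetSome E m hmE
    have hcl : min m K.length + m = (pvIl (K.take m) (E.take m)).length := by
      rw [pvIl_len]; simp; omega
    by_cases hmK : m < K.length
    · have hgK := pvGetSome K m hmK
      have hguard : ((m : Int) < ((K.map some).length : Int) ∧
          PySem.List.pyGetD (K.map some) ((m : Nat) : Int) none ≠ none) := by
        refine ⟨by simp; exact_mod_cast hmK, by rw [hgK]; simp⟩
      unfold pvWriteIf
      rw [if_pos hguard, hgK]
      rw [hcl, pvWrite _ _ _ (by rw [← hcl]; omega)]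
      rw [if_pos (by rw [hgE]; simp), hgE]
      dsimp only
      have hlen2 : (pvIl (K.take m) (E.take m)).length + 1
          = ((pvIl (K.take m) (E.take m)) ++ [K[m]!]).length := by simp
      rw [hlen2, pvWrite _ _ _ (by simp [← hcl]; omega)]
      rw [pvIl_take m K E hmE hKE, if_pos hmK]
      simp only [Prod.mk.injEq]
      refine ⟨?_, by omega⟩
      congr 1
      · simp
      · congr 1; simp [← hcl]; omega
    · have hguard : ¬ ((m : Int) < ((K.map some).length : Int) ∧
          PySem.List.pyGetD (K.map some) ((m : Nat) : Int) none ≠ none) := by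
        rintro ⟨h1, -⟩
        simp at h1; omega
      unfold pvWriteIf
      rw [if_neg hguard]
      rw [if_pos (by rw [hgE]; simp), hgE]
      dsimp only
      rw [hcl, pvWrite _ _ _ (by rw [← hcl]; omega)]
      rw [pvIl_take m K E hmE hKE, if_neg hmK]
      simp only [Prod.mk.injEq]
      refine ⟨?_, by omega⟩
      have hrep : N - ((pvIl (List.take m K) (List.take m E)).length + 1)
          = N - (min (m + 1) K.length + (m + 1)) := by omega
      rw [hrep]

theorem loop2_odd (E K : List Int) (N : Nat) (hKE : K.length ≤ E.length)
    (hN : N = E.length + K.length) :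
    ∀ (m : Nat), m ≤ E.length →
    (PySem.List.pyRange 0 (m : Int) 1).foldl
      (fun (s : List (Option Int) × Nat) i =>
        pvWriteIf
          (pvWriteIf s (PySem.List.pyGetD (E.map some) i none ≠ none)
            (PySem.List.pyGetD (E.map some) i none))
          (i < ((K.map some).length : Int) ∧ PySem.List.pyGetD (K.map some) i none ≠ none)
          (PySem.List.pyGetD (K.map some) i none))
      (List.replicate N none, 0)
    = ((pvIl (E.take m) (K.take m)).map some ++
        List.replicate (N - (m + min m K.length)) none, m + min m K.length) := by
  intro m
  induction m with
  | zero =>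
    intro _
    rw [show ((0 : Nat) : Int) = 0 by rfl, PySem.List.pyRange_one_eq_nil (by omega)]
    simp [pvIl]
  | succ m ih =>
    intro hm
    have hc : ((m + 1 : Nat) : Int) = (m : Int) + 1 := by push_cast; ring
    rw [hc, PySem.List.pyRange_one_succ_right (by positivity), List.foldl_append,
        ih (by omega), List.foldl_cons, List.foldl_nil]
    have hmE : m < E.length := by omega
    have hgE := pvGetSome E m hmE
    have hcl : m + min m K.length = (pvIl (E.take m) (K.take m)).length := by
      rw [pvIl_len]; simp; omega
    unfold pvWriteIf
    by_cases hmK : m < K.length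
    · have hgK := pvGetSome K m hmK
      have hguard : ((m : Int) < ((K.map some).length : Int) ∧
          PySem.List.pyGetD (K.map some) ((m : Nat) : Int) none ≠ none) := by
        refine ⟨by simp; exact_mod_cast hmK, by rw [hgK]; simp⟩
      rw [if_pos hguard, hgK, hgE]
      rw [if_pos (show some (E[m]!) ≠ none by simp)]
      dsimp only
      rw [hcl, pvWrite _ _ _ (by rw [← hcl]; omega)]
      have hlen2 : (pvIl (E.take m) (K.take m)).length + 1
          = ((pvIl (E.take m) (K.take m)) ++ [E[m]!]).length := by simp
      rw [hlen2, pvWrite _ _ _ (by simp [← hcl]; omega)]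
      rw [pvIl_take' m E K hmE hKE, if_pos hmK]
      simp only [Prod.mk.injEq]
      refine ⟨?_, by omega⟩
      congr 1
      · simp
      · congr 1; simp [← hcl]; omega
    · have hguard : ¬ ((m : Int) < ((K.map some).length : Int) ∧
          PySem.List.pyGetD (K.map some) ((m : Nat) : Int) none ≠ none) := by
        rintro ⟨h1, -⟩
        simp at h1; omega
      rw [if_neg hguard, hgE]
      rw [if_pos (show some (E[m]!) ≠ none by simp)]
      dsimp only
      rw [hcl, pvWrite _ _ _ (by rw [← hcl]; omega)]
      rw [pvIl_take' m E K hmE hKE, if_neg hmK]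
      simp only [Prod.mk.injEq]
      refine ⟨?_, by omega⟩
      have hrep : N - ((pvIl (List.take m E) (List.take m K)).length + 1)
          = N - (m + 1 + min (m + 1) K.length) := by omega
      rw [hrep]

theorem pvGetBack (L : List Int) (i : Int) (h0 : 0 ≤ i) (h1 : i < (L.length : Int)) :
    (PySem.List.pyGetD (L.map some) i none).getD 0 = PySem.List.pyGetD L i 0 := by
  have h1' : i < ((L.map some).length : Int) := by simpa using h1
  rw [PySem.List.pyGetD_eq_getElem _ _ h0 h1', PySem.List.pyGetD_eq_getElem _ _ h0 h1]
  simp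

theorem pvMapRange (v : Int → Int) (n : Nat) :
    (PySem.List.pyRange 0 ((n : Nat) : Int) 1).map v = pvCm v n := by
  rw [PySem.List.pyRange_zero_nat, List.map_map]
  simp only [pvCm, Function.comp_def]

theorem pvTdiv (n : Nat) : Int.tdiv ((n : Nat) : Int) 2 = ((n / 2 : Nat) : Int) := by
  rw [Int.tdiv_eq_ediv, if_pos (Or.inl (by positivity))]
  omega

theorem pvGn (n : Nat) :
    (if PySem.Int.mod ((n : Nat) : Int) 2 ≠ 0 then Int.tdiv ((n : Nat) : Int) 2 + 1
     else Int.tdiv ((n : Nat) : Int) 2) = (((n + 1) / 2 : Nat) : Int) := by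
  rw [PySem.Int.mod_eq_emod_of_pos (by norm_num), pvTdiv]
  split <;> omega

-- ===== VERDICT (by name: the statement is the Claim_ definition above) =====
theorem f_shuffle_r_spec : Claim_equal_f_shuffle_r := by
  unfold Claim_equal_f_shuffle_r
  intro ar snum x y hdom hpre
  unfold Spec_f_shuffle_r
  by_cases hy : y ≤ 0
  · simp only [f_shuffle_r, f_shuffle_r_alt, PySem.List.pyRange_one_eq_nil hy, List.foldl_nil]
  · obtain ⟨n, rfl⟩ : ∃ n : Nat, y = (n : Int) := ⟨y.toNat, by omega⟩
    have hn : 0 < n := by omega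
    simp only [f_shuffle_r, f_shuffle_r_alt]
    rw [pvGn n, pvTdiv n]
    simp only [Int.toNat_natCast]
    rw [pvMapRange (fun i => PySem.List.pyGetD (PySem.List.pyGetD ar i []) x 0) n]
    have hE : (pvEvens (pvCm (fun i => PySem.List.pyGetD (PySem.List.pyGetD ar i []) x 0) n)).length
        = (n + 1) / 2 := by rw [(pvEO_len _).1, pvCm_len]
    have hO : (pvOdds (pvCm (fun i => PySem.List.pyGetD (PySem.List.pyGetD ar i []) x 0) n)).length
        = n / 2 := by rw [(pvEO_len _).2, pvCm_len]
    by_cases hs : PySem.Int.mod snum 2 = 0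
    · rw [if_pos hs, if_pos hs]
      simp only [loop1_even (fun i => PySem.List.pyGetD (PySem.List.pyGetD ar i []) x 0)
            ((n + 1) / 2) (n / 2) n (by omega) (by omega)]
      simp only [Nat.sub_self, List.replicate_zero, List.append_nil]
      rw [loop2_even
            (pvOdds (pvCm (fun i => PySem.List.pyGetD (PySem.List.pyGetD ar i []) x 0) n))
            (pvEvens (pvCm (fun i => PySem.List.pyGetD (PySem.List.pyGetD ar i []) x 0) n))
            n (by rw [hE, hO]; omega) (by rw [hE, hO]; omega) ((n + 1) / 2) (by rw [hE])]
      dsimp only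
      rw [List.take_of_length_le (by rw [hO]; omega), List.take_of_length_le (by rw [hE])]
      rw [show n - (min ((n + 1) / 2)
            (pvOdds (pvCm (fun i => PySem.List.pyGetD (PySem.List.pyGetD ar i []) x 0) n)).length
            + (n + 1) / 2) = 0 from by rw [hO]; omega]
      simp only [List.replicate_zero, List.append_nil]
      rw [slice1', slice0', pvRiffle_eq_pvIl]
      apply PySem.List.foldl_congr_mem
      intro acc i hi
      obtain ⟨h0, h1⟩ := (PySem.List.mem_pyRange_one).mp hi
      rw [pvGetBack _ i h0 (by rw [pvIl_len, hE, hO]; push_cast; omega)]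
    · rw [if_neg hs, if_neg hs]
      simp only [loop1_odd (fun i => PySem.List.pyGetD (PySem.List.pyGetD ar i []) x 0)
            ((n + 1) / 2) (n / 2) n (by omega)]
      rw [show (n + 1) / 2 - min n ((n + 1) / 2) = 0 from by omega,
          show n / 2 - (n - (n + 1) / 2) = 0 from by omega]
      simp only [List.replicate_zero, List.append_nil]
      have hT : ((pvCm (fun i => PySem.List.pyGetD (PySem.List.pyGetD ar i []) x 0) n).take
          ((n + 1) / 2)).length = (n + 1) / 2 := by
        rw [List.length_take, pvCm_len]; omega
      have hD : ((pvCm (fun i => PySem.List.pyGetD (PySem.List.pyGetD ar i []) x 0) n).drop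
          ((n + 1) / 2)).length = n - (n + 1) / 2 := by
        rw [List.length_drop, pvCm_len]
      rw [loop2_odd
            ((pvCm (fun i => PySem.List.pyGetD (PySem.List.pyGetD ar i []) x 0) n).take ((n + 1) / 2))
            ((pvCm (fun i => PySem.List.pyGetD (PySem.List.pyGetD ar i []) x 0) n).drop ((n + 1) / 2))
            n (by rw [hT, hD]; omega) (by rw [hT, hD]; omega) ((n + 1) / 2) (by rw [hT])]
      dsimp only
      rw [List.take_of_length_le
            (show ((pvCm (fun i => PySem.List.pyGetD (PySem.List.pyGetD ar i []) x 0) n).take ((n + 1) / 2)).length ≤ (n + 1) / 2 from by rw [hT]),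
          List.take_of_length_le
            (show ((pvCm (fun i => PySem.List.pyGetD (PySem.List.pyGetD ar i []) x 0) n).drop ((n + 1) / 2)).length ≤ (n + 1) / 2 from by rw [hD]; omega)]
      rw [show n - ((n + 1) / 2 + min ((n + 1) / 2)
            ((pvCm (fun i => PySem.List.pyGetD (PySem.List.pyGetD ar i []) x 0) n).drop
              ((n + 1) / 2)).length) = 0 from by rw [hD]; omega]
      simp only [List.replicate_zero, List.append_nil]
      rw [show ((pvCm (fun i => PySem.List.pyGetD (PySem.List.pyGetD ar i []) x 0) n).length : Int)
            = ((n : Nat) : Int) from by rw [pvCm_len]]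
      rw [show PySem.Int.floordiv (((n : Nat) : Int) + 1) 2 = (((n + 1) / 2 : Nat) : Int) from by
            rw [PySem.Int.floordiv_eq_ediv_of_pos (by norm_num)]; omega]
      rw [PySem.List.slice_to_natCast, PySem.List.slice_from_natCast]
      rw [pvRiffle_eq_pvIl]
      apply PySem.List.foldl_congr_mem
      intro acc i hi
      obtain ⟨h0, h1⟩ := (PySem.List.mem_pyRange_one).mp hi
      rw [pvGetBack _ i h0 (by rw [pvIl_len, hT, hD]; push_cast; omega)]
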